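-- pv_equiv track=rewrite | github.com/kimbjabgok/capev2_Analysis | modules/analysis.py | filter_registry_keys
-- ===== SOURCE A (Python) =====
-- def filter_registry_keys(keys: list, wn: dict) -> list:
--     blocked = [p.lower() for p in wn.get("registry_keys", [])]
--     result = []
--     for k in keys:
--         key_lower = k.lower()
--         if not any(key_lower.startswith(b) for b in blocked):
--             result.append(k)
--     return result
-- ===== SOURCE B (Python) =====
-- def filter_registry_keys(keys: list, wn: dict) -> list:
--     blocked = set(p.lower() for p in wn.get("registry_keys", []))
--     lengths = sorted(set(len(b) for b in blocked))
--     return [k for k in keys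
--             if not any(k.lower()[:n] in blocked for n in lengths)]
-- ===== Notes on version B (the rewrite author's own statement) =====
-- stated objective: alternative
-- what changed: Instead of testing each key against every blocked prefix with startswith, B builds a hash set of lowered blocked prefixes and, per key, checks only one set lookup per distinct prefix length.
import Mathlib
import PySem

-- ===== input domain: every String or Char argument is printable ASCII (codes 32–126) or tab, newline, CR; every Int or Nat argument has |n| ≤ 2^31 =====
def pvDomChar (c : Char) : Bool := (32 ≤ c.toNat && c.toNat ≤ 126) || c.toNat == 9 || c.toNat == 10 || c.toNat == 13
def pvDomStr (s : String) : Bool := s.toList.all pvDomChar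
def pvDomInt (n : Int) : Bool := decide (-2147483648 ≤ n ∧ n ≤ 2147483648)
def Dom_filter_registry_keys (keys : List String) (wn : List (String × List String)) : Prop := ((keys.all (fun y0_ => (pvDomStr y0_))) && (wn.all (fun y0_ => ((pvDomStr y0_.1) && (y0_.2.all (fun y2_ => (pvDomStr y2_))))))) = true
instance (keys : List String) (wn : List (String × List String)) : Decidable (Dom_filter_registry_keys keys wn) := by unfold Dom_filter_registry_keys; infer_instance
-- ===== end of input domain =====

-- B replaces A's per-key scan over every blocked prefix by a set of blocked prefixes
-- plus one lookup per distinct blocked-prefix length (objective: alternative).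

-- ===== PORT A =====
def filter_registry_keys (keys : List String) (wn : List (String × List String)) : List String :=
  let blocked := (PySem.Dict.getD (PySem.Dict.mk wn) "registry_keys" []).map (fun p => PySem.Str.lower p)
  keys.foldl (fun result k =>
    let key_lower := PySem.Str.lower k
    if !(blocked.any (fun b => PySem.Str.startswith key_lower b)) then result ++ [k] else result) []

-- ===== PORT B =====
def filter_registry_keys_alt (keys : List String) (wn : List (String × List String)) : List String :=
  let blocked : PySem.Set String :=
    PySem.Set.ofList ((PySem.Dict.getD (PySem.Dict.mk wn) "registry_keys" []).map (fun p => PySem.Str.lower p))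
  let lengths := PySem.List.sorted (PySem.Set.ofList (blocked.map (fun b => PySem.Str.len b))) (fun x => x) false
  keys.filter (fun k =>
    !(lengths.any (fun n => PySem.Set.contains blocked (PySem.Str.slice (PySem.Str.lower k) none (some n)))))

-- ===== PRECONDITION & SPEC =====
def Spec_filter_registry_keys (keys : List String) (wn : List (String × List String)) (out : List String) : Prop := out = filter_registry_keys_alt keys wn
instance (keys : List String) (wn : List (String × List String)) (out : List String) : Decidable (Spec_filter_registry_keys keys wn out) := by unfold Spec_filter_registry_keys; infer_instance

-- ===== CLAIM (what is proved, stated in full; the proofs are below) =====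
def Claim_equal_filter_registry_keys : Prop := ∀ (keys : List String) (wn : List (String × List String)), Dom_filter_registry_keys keys wn → Spec_filter_registry_keys keys wn (filter_registry_keys keys wn)

-- ===== LEMMAS AND PROOFS =====

-- per-key agreement: some blocked prefix matches the key iff, for some blocked-prefix
-- length n, the key's n-prefix is in the blocked set
theorem pv_key_match (bl : List String) (kl : String) :
    bl.any (fun b => PySem.Str.startswith kl b) =
    (PySem.List.sorted (PySem.Set.ofList ((PySem.Set.ofList bl).map (fun b => PySem.Str.len b))) (fun x => x) false).any
      (fun n => PySem.Set.contains (PySem.Set.ofList bl) (PySem.Str.slice kl none (some n))) := by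
  rw [Bool.eq_iff_iff]
  simp only [List.any_eq_true, PySem.List.mem_sorted, PySem.Set.mem_ofList, List.mem_map,
    PySem.Set.contains_iff, PySem.Str.startswith_eq, PySem.Chars.startswith_iff]
  constructor
  · rintro ⟨b, hb, hpre⟩
    refine ⟨PySem.Str.len b, ⟨b, hb, rfl⟩, ?_⟩
    have : PySem.Str.slice kl none (some (PySem.Str.len b)) = b := by
      apply String.toList_inj.mp
      rw [PySem.Str.toList_slice]
      have hlen : PySem.Str.len b = (b.toList.length : Int) := by simp
      rw [hlen]
      simp only [PySem.Chars.slice_eq_listSlice, PySem.List.slice_to_natCast]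
      rw [← List.prefix_iff_eq_take.mp hpre]
    rw [this]; exact hb
  · rintro ⟨n, ⟨b, _, hbn⟩, hmem⟩
    refine ⟨PySem.Str.slice kl none (some n), hmem, ?_⟩
    have hn : n = ((n.toNat : Nat) : Int) := by
      have : (0:Int) ≤ n := by rw [← hbn]; simp
      omega
    have : (PySem.Str.slice kl none (some n)).toList = kl.toList.take n.toNat := by
      rw [PySem.Str.toList_slice, hn]
      simp only [PySem.Chars.slice_eq_listSlice, PySem.List.slice_to_natCast, Int.toNat_natCast]
    rw [this]
    exact List.take_prefix n.toNat kl.toList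

-- ===== VERDICT (by name: the statement is the Claim_ definition above) =====
theorem filter_registry_keys_spec : Claim_equal_filter_registry_keys := by
  intro keys wn _
  unfold Spec_filter_registry_keys filter_registry_keys filter_registry_keys_alt
  rw [PySem.List.foldl_append_if
    (p := fun k => !((PySem.Dict.getD (PySem.Dict.mk wn) "registry_keys" []).map (fun p => PySem.Str.lower p)).any
      (fun b => PySem.Str.startswith (PySem.Str.lower k) b))
    (f := fun k => k)]
  simp only [List.map_id', List.nil_append]
  apply List.filter_congr
  intro k _
  rw [pv_key_match]
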